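-- pv_equiv track=rewrite | github.com/wjmallard/twitter-screenshot-search | src/app.py | _page_numbers
-- ===== SOURCE A (Python) =====
-- def _page_numbers(current, total):
--     """Generate page numbers with ellipsis. Returns list of ints and None (for ellipsis)."""
--     if total <= 5:
--         return list(range(1, total + 1))
--     # Build a window of 3 around current, clamped to edges
--     win_start = max(1, min(current - 1, total - 3))
--     win_end = min(total, max(current + 1, 4))
--     pages = {1, total}
--     for p in range(win_start, win_end + 1):
--         pages.add(p)
--     result = []
--     for p in sorted(pages):
--         if result and p - result[-1] > 1:
--             result.append(None)
--         result.append(p)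
--     return result
-- ===== SOURCE B (Python) =====
-- def _page_numbers(current, total):
--     """Generate page numbers with ellipsis. Returns list of ints and None (for ellipsis)."""
--     if total <= 5:
--         return list(range(1, total + 1))
--     win_start = max(1, min(current - 1, total - 3))
--     win_end = min(total, max(current + 1, 4))
--     result = [1]
--     if win_start > 2:
--         result.append(None)
--     result.extend(range(max(win_start, 2), min(win_end, total - 1) + 1))
--     if win_end < total - 1:
--         result.append(None)
--     result.append(total)
--     return result
-- ===== Notes on version B (the rewrite author's own statement) =====
-- stated objective: simpler
-- what changed: Builds the result directly from segments (1, optional ellipsis, the clamped window, optional ellipsis, total) instead of collecting a set, sorting it and scanning for gaps.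
import Mathlib
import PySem

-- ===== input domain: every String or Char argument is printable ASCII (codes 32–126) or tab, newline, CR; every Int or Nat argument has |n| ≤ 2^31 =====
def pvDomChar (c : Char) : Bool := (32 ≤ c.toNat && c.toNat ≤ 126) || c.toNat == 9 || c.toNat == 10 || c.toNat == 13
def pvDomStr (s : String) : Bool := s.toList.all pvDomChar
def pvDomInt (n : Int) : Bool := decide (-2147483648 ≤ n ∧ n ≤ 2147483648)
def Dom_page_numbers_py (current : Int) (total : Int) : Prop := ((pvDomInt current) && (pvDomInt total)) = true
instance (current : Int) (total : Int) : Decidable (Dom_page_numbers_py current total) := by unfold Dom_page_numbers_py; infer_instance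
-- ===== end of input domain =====

-- B builds the pagination list directly from segments (1, optional ellipsis, clamped window,
-- optional ellipsis, total) instead of A's set + sort + gap-scan; same values everywhere.


-- ===== PORT A =====
-- loop body of A's second loop: 'if result and p - result[-1] > 1: result.append(None)'; 'result.append(p)'.
-- result[-1] is always the integer appended at the end of the previous iteration (every iteration ends
-- with 'result.append(p)'), so the '| _' arm (empty result, handled by 'if result') is Python-exact.
def pyGapStep (result : List (Option Int)) (p : Int) : List (Option Int) :=
  (match PySem.List.pyGet? result (-1) with
   | some (some prev) => if p - prev > 1 then result ++ [none] else result
   | _ => result) ++ [some p]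

def page_numbers_py (current : Int) (total : Int) : List (Option Int) :=
  if total ≤ 5 then
    (PySem.List.pyRange 1 (total + 1) 1).map some
  else
    let winStart := max 1 (min (current - 1) (total - 3))
    let winEnd := min total (max (current + 1) 4)
    let pages : PySem.Set Int :=
      (PySem.List.pyRange winStart (winEnd + 1) 1).foldl (fun s p => PySem.Set.add s p)
        (PySem.Set.ofList [1, total])
    (PySem.List.sorted pages (fun x => x) false).foldl pyGapStep []

-- ===== PORT B =====
def page_numbers_py_alt (current : Int) (total : Int) : List (Option Int) :=
  if total ≤ 5 then
    (PySem.List.pyRange 1 (total + 1) 1).map some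
  else
    let winStart := max 1 (min (current - 1) (total - 3))
    let winEnd := min total (max (current + 1) 4)
    [some 1]
      ++ (if winStart > 2 then [none] else [])
      ++ (PySem.List.pyRange (max winStart 2) (min winEnd (total - 1) + 1) 1).map some
      ++ (if winEnd < total - 1 then [none] else [])
      ++ [some total]

-- ===== PRECONDITION & SPEC =====
def Spec_page_numbers_py (current : Int) (total : Int) (out : List (Option Int)) : Prop := out = page_numbers_py_alt current total
instance (current : Int) (total : Int) (out : List (Option Int)) : Decidable (Spec_page_numbers_py current total out) := by unfold Spec_page_numbers_py; infer_instance

-- ===== CLAIM (what is proved, stated in full; the proofs are below) =====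
def Claim_equal_page_numbers_py : Prop := ∀ (current : Int) (total : Int), Dom_page_numbers_py current total → Spec_page_numbers_py current total (page_numbers_py current total)

-- ===== LEMMAS AND PROOFS =====

-- A's gap-loop body when the last appended element is the page 'prev'
lemma pyGapStep_eq (res : List (Option Int)) (prev p : Int)
    (h : res.getLast? = some (some prev)) :
    pyGapStep res p = (if p - prev > 1 then res ++ [none] else res) ++ [some p] := by
  unfold pyGapStep
  rw [PySem.List.pyGet?_neg_one, h]

-- A's set {1, total} ∪ {winStart..winEnd}, sorted, is 1, then the window clamped to (1, total), then total.
lemma sorted_pages_eq (ws we total : Int)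
    (h1 : 1 ≤ ws) (h2 : ws ≤ total - 3) (h3 : 4 ≤ we) (h4 : we ≤ total) (h6 : 5 < total) :
    PySem.List.sorted
      ((PySem.List.pyRange ws (we + 1) 1).foldl (fun s p => PySem.Set.add s p)
        (PySem.Set.ofList [1, total])) (fun x => x) false
    = 1 :: (PySem.List.pyRange (max ws 2) (min we (total - 1) + 1) 1 ++ [total]) := by
  have hfold : (PySem.List.pyRange ws (we + 1) 1).foldl (fun s p => PySem.Set.add s p)
        (PySem.Set.ofList [1, total])
      = PySem.Set.update (PySem.Set.ofList [1, total]) (PySem.List.pyRange ws (we + 1) 1) := rfl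
  have hpair : List.Pairwise (· < ·)
      ((1 : Int) :: (PySem.List.pyRange (max ws 2) (min we (total - 1) + 1) 1 ++ [total])) := by
    constructor
    · intro y hy
      simp only [List.mem_append, List.mem_singleton, PySem.List.mem_pyRange_one] at hy
      omega
    · rw [List.pairwise_append]
      refine ⟨PySem.List.pairwise_lt_pyRange_one _ _, List.pairwise_singleton _ _, ?_⟩
      intro y hy z hz
      simp only [PySem.List.mem_pyRange_one] at hy
      simp only [List.mem_singleton] at hz
      omega
  rw [hfold]
  apply PySem.List.sorted_eq_of_perm_of_pairwise_lt
  · -- permutation: both sides are Nodup with the same members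
    rw [List.perm_ext_iff_of_nodup]
    · intro x
      simp only [List.mem_cons, List.mem_append, List.not_mem_nil,
        or_false, PySem.Set.mem_update, PySem.Set.mem_ofList, PySem.List.mem_pyRange_one]
      omega
    · exact hpair.nodup
    · exact PySem.Set.nodup_update _ _ (PySem.Set.nodup_ofList _)
  · exact hpair

-- running the gap loop over a contiguous run starting one past the last appended page adds no ellipsis
lemma gap_run (n : Nat) : ∀ (res : List (Option Int)) (prev : Int),
    (PySem.List.pyRange (prev + 1) (prev + 1 + n) 1).foldl pyGapStep (res ++ [some prev])
    = res ++ [some prev] ++ (PySem.List.pyRange (prev + 1) (prev + 1 + n) 1).map some := by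
  induction n with
  | zero =>
    intro res prev
    rw [show ((0 : Nat) : Int) = 0 from rfl, add_zero, PySem.List.pyRange_one_eq_nil (by omega)]
    simp
  | succ n ih =>
    intro res prev
    push_cast
    rw [show prev + 1 + ((n : Int) + 1) = prev + 1 + 1 + n by ring,
      PySem.List.pyRange_one_cons (by omega)]
    simp only [List.foldl_cons, List.map_cons]
    rw [pyGapStep_eq (res ++ [some prev]) prev (prev + 1) List.getLast?_concat,
      if_neg (by omega)]
    have := ih (res ++ [some prev]) (prev + 1)
    simp only [List.append_assoc] at this ⊢
    exact this

-- the gap loop on the sorted list 1 :: window ++ [total] produces B's segments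
lemma gap_fold_eq (a b total : Int)
    (ha : 2 ≤ a) (hab : a ≤ b) (hb : b ≤ total - 1) :
    (1 :: (PySem.List.pyRange a (b + 1) 1 ++ [total])).foldl pyGapStep []
    = [some 1] ++ (if 2 < a then [none] else [])
        ++ (PySem.List.pyRange a (b + 1) 1).map some
        ++ (if b < total - 1 then [none] else []) ++ [some total] := by
  have e2 : PySem.List.pyRange a (b + 1) = PySem.List.pyRange a b ++ [b] :=
    PySem.List.pyRange_one_succ_right (by omega)
  have e1 : PySem.List.pyRange a (b + 1) = a :: PySem.List.pyRange (a + 1) (b + 1) :=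
    PySem.List.pyRange_one_cons (by omega)
  conv_lhs => rw [e1]
  simp only [List.foldl_cons, List.cons_append, List.foldl_append, List.foldl_nil]
  have h0 : pyGapStep [] 1 = [some 1] := by decide
  have h1 : pyGapStep [some 1] a = (some 1 :: (if 2 < a then [none] else [])) ++ [some a] := by
    rw [pyGapStep_eq [some 1] 1 a rfl]
    by_cases hc : 2 < a
    · rw [if_pos (by omega), if_pos hc]; rfl
    · rw [if_neg (by omega), if_neg hc]
  rw [h0, h1]
  have hn : (b + 1 : Int) = a + 1 + ((b - a).toNat : Int) := by omega
  rw [hn, gap_run ((b - a).toNat) (some 1 :: (if 2 < a then [none] else [])) a, ← hn]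
  have hcomb : (some a : Option Int) :: (PySem.List.pyRange (a + 1) (b + 1)).map some
      = (PySem.List.pyRange a b).map some ++ [some b] := by
    have h' : (some a : Option Int) :: (PySem.List.pyRange (a + 1) (b + 1)).map some
        = (PySem.List.pyRange a (b + 1)).map some := by rw [e1]; rfl
    rw [h', e2]; simp
  have hstate : (some 1 :: (if 2 < a then [none] else [])) ++ [some a]
        ++ (PySem.List.pyRange (a + 1) (b + 1)).map some
      = ((some 1 :: (if 2 < a then [none] else [])) ++ (PySem.List.pyRange a b).map some)
        ++ [some b] := by
    simp only [List.append_assoc, List.singleton_append]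
    rw [show (some a : Option Int) :: (PySem.List.pyRange (a + 1) (b + 1)).map some
        = (PySem.List.pyRange a b).map some ++ [some b] from hcomb]
  rw [hstate, pyGapStep_eq _ b total List.getLast?_concat, e2]
  by_cases hc : b < total - 1
  · rw [if_pos (by omega), if_pos hc]
    simp [List.append_assoc]
  · rw [if_neg (by omega), if_neg hc]
    simp [List.append_assoc]

-- ===== VERDICT (by name: the statement is the Claim_ definition above) =====
theorem page_numbers_py_spec : Claim_equal_page_numbers_py := by
  intro current total _
  unfold Spec_page_numbers_py page_numbers_py page_numbers_py_alt
  by_cases h : total ≤ 5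
  · rw [if_pos h, if_pos h]
  · rw [if_neg h, if_neg h]
    simp only []
    rw [sorted_pages_eq (max 1 (min (current - 1) (total - 3))) (min total (max (current + 1) 4))
      total (by omega) (by omega) (by omega) (by omega) (by omega)]
    rw [gap_fold_eq _ _ total (by omega) (by omega) (by omega)]
    simp only [show (2 < max (max 1 (min (current - 1) (total - 3))) 2)
        ↔ (max 1 (min (current - 1) (total - 3)) > 2) from by omega,
      show (min (min total (max (current + 1) 4)) (total - 1) < total - 1)
        ↔ (min total (max (current + 1) 4) < total - 1) from by omega,
      List.append_assoc, List.cons_append, List.nil_append]
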